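-- pv_equiv track=rewrite | github.com/almostanonymousdev/ghost-in-m-sheet | tools/format_twee.py | ensure_blank_before_headers
-- ===== SOURCE A (Python) =====
-- def ensure_blank_before_headers(lines: list[str]) -> list[str]:
--     """Ensure exactly one blank line before every `:: …` header (except the
--     first non-empty line in the file)."""
--     out: list[str] = []
--     for i, line in enumerate(lines):
--         is_header = line.startswith("::")
--         if is_header and out:
--             # Walk back over existing blanks
--             blanks = 0
--             while out and out[-1].strip() == "":
--                 out.pop()
--                 blanks += 1
--             # Only add a separator if there was actual content above
--             if out:
--                 out.append("")
--         out.append(line)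
--     return out
-- ===== SOURCE B (Python) =====
-- def ensure_blank_before_headers(lines: list[str]) -> list[str]:
--     """Ensure exactly one blank line before every `:: …` header (except the
--     first non-empty line in the file)."""
--     out: list[str] = []
--     buffer: list[str] = []  # blank lines not yet emitted
--     for line in lines:
--         if line.startswith("::"):
--             buffer.clear()  # blanks before a header are replaced by one separator
--             if out:
--                 out.append("")
--             out.append(line)
--         elif line.strip() == "":
--             buffer.append(line)
--         else:
--             out.extend(buffer)
--             buffer.clear()
--             out.append(line)
--     out.extend(buffer)
--     return out
-- ===== Notes on version B (the rewrite author's own statement) =====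
-- stated objective: alternative
-- what changed: Replaces A's look-back while-pop mutation of out before each header by a single forward pass that buffers consecutive blank lines and either flushes them before content or discards them at a header (emitting one '' separator when out is non-empty).
import Mathlib
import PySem

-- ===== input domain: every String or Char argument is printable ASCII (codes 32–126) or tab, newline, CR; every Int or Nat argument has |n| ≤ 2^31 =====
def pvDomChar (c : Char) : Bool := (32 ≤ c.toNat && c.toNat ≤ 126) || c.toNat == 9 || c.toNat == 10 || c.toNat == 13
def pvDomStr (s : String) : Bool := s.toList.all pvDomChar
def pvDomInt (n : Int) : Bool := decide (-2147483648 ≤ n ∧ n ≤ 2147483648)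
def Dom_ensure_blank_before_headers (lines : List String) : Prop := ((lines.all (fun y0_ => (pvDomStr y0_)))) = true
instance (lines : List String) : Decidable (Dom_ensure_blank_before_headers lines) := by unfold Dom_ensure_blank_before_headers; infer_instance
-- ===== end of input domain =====

-- B replaces A's look-back pop-loop over `out` by a single forward pass that buffers
-- consecutive blank lines and emits or discards them when the next non-blank line is seen
-- (objective: alternative decomposition, same cost).

-- ===== PORT A =====
-- the inner `while out and out[-1].strip() == "": out.pop()` loop, acting on out.reverse
def pvPopBlanksRev : List String → List String
  | [] => []
  | x :: xs => if PySem.Str.strip x = "" then pvPopBlanksRev xs else x :: xs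

def pvStepA (out : List String) (line : String) : List String :=
  let is_header := PySem.Str.startswith line "::"
  if is_header = true ∧ out ≠ [] then
    let out2 := (pvPopBlanksRev out.reverse).reverse
    (if out2 ≠ [] then out2 ++ [""] else out2) ++ [line]
  else
    out ++ [line]

def ensure_blank_before_headers (lines : List String) : List String :=
  lines.foldl pvStepA []

-- ===== PORT B =====
-- state = (out, buffer of pending blank lines)
def pvStepB (s : List String × List String) (line : String) : List String × List String :=
  if PySem.Str.startswith line "::" = true then
    ((if s.1 ≠ [] then s.1 ++ [""] else s.1) ++ [line], [])
  else if PySem.Str.strip line = "" then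
    (s.1, s.2 ++ [line])
  else
    (s.1 ++ s.2 ++ [line], [])

def ensure_blank_before_headers_alt (lines : List String) : List String :=
  let s := lines.foldl pvStepB ([], [])
  s.1 ++ s.2

-- ===== PRECONDITION & SPEC =====
def Spec_ensure_blank_before_headers (lines : List String) (out : List String) : Prop := out = ensure_blank_before_headers_alt lines
instance (lines : List String) (out : List String) : Decidable (Spec_ensure_blank_before_headers lines out) := by unfold Spec_ensure_blank_before_headers; infer_instance

-- ===== CLAIM (what is proved, stated in full; the proofs are below) =====
def Claim_equal_ensure_blank_before_headers : Prop := ∀ (lines : List String), Dom_ensure_blank_before_headers lines → Spec_ensure_blank_before_headers lines (ensure_blank_before_headers lines)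

-- ===== LEMMAS AND PROOFS =====

-- a line that starts with "::" is not blank
lemma header_not_blank (l : String) (h : PySem.Str.startswith l "::" = true) :
    PySem.Str.strip l ≠ "" := by
  intro hs
  have h2 : PySem.Chars.startswith l.toList ("::".toList) = true := by
    simpa using h
  rw [PySem.Chars.startswith_iff] at h2
  obtain ⟨t, ht⟩ := h2
  have htl : (PySem.Str.strip l).toList = ([] : List Char) := by rw [hs]; rfl
  rw [PySem.Str.toList_strip] at htl
  rw [← ht] at htl
  simp [PySem.Chars.strip, PySem.Chars.lstrip, PySem.Chars.rstrip,
        PySem.Chars.isspace, List.dropWhile_eq_nil_iff] at htl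
  have := htl ':' (by simp)
  simp at this

lemma popBlanksRev_append (l1 l2 : List String)
    (h : ∀ b ∈ l1, PySem.Str.strip b = "") :
    pvPopBlanksRev (l1 ++ l2) = pvPopBlanksRev l2 := by
  induction l1 with
  | nil => rfl
  | cons x xs ih =>
    simp only [List.cons_append, pvPopBlanksRev, h x (by simp), if_pos]
    exact ih (fun b hb => h b (by simp [hb]))

lemma popBlanksRev_of_last_nonblank (out : List String)
    (h : ∀ l, out.getLast? = some l → PySem.Str.strip l ≠ "") :
    pvPopBlanksRev out.reverse = out.reverse := by
  cases hrev : out.reverse with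
  | nil => rfl
  | cons x xs =>
    have hx : out.getLast? = some x := by
      rw [← List.head?_reverse, hrev]; rfl
    simp [pvPopBlanksRev, h x hx]

lemma fold_agree (lines : List String) : ∀ (out buf : List String),
    (∀ b ∈ buf, PySem.Str.strip b = "") →
    (∀ l, out.getLast? = some l → PySem.Str.strip l ≠ "") →
    lines.foldl pvStepA (out ++ buf) =
      (lines.foldl pvStepB (out, buf)).1 ++ (lines.foldl pvStepB (out, buf)).2 := by
  induction lines with
  | nil => intro out buf _ _; simp
  | cons line rest ih =>
    intro out buf hbuf hout
    simp only [List.foldl_cons]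
    by_cases hh : PySem.Str.startswith line "::" = true
    · -- header line
      have hh' : PySem.Chars.startswith line.toList [':', ':'] = true := by
        simpa using hh
      have hnb := header_not_blank line hh
      have hpop : pvPopBlanksRev ((out ++ buf).reverse) = out.reverse := by
        rw [List.reverse_append,
            popBlanksRev_append buf.reverse out.reverse
              (fun b hb => hbuf b (List.mem_reverse.mp hb)),
            popBlanksRev_of_last_nonblank out hout]
      have hA : pvStepA (out ++ buf) line =
          (if out ≠ [] then out ++ [""] else out) ++ [line] := by
        by_cases hne : out ++ buf = []
        · obtain ⟨h1, h2⟩ := List.append_eq_nil_iff.mp hne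
          simp [pvStepA, h1, h2]
        · simp only [pvStepA, hh, true_and]
          rw [if_pos hne, hpop, List.reverse_reverse]
      have hB : pvStepB (out, buf) line =
          ((if out ≠ [] then out ++ [""] else out) ++ [line], []) := by
        simp [pvStepB, hh']
      rw [hA, hB]
      have hlast : ∀ l, ((if out ≠ [] then out ++ [""] else out) ++ [line]).getLast? = some l →
          PySem.Str.strip l ≠ "" := by
        intro l hl
        simp [List.getLast?_append] at hl
        rw [← hl]; exact hnb
      simpa using ih ((if out ≠ [] then out ++ [""] else out) ++ [line]) [] (by simp) hlast
    · -- not a header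
      have hh' : PySem.Chars.startswith line.toList [':', ':'] = false := by
        have := PySem.Str.startswith_eq line "::"
        simp only [Bool.not_eq_true] at hh
        simpa [this] using hh
      by_cases hb : PySem.Str.strip line = ""
      · -- blank line: buffered by B, appended by A
        have hA : pvStepA (out ++ buf) line = out ++ (buf ++ [line]) := by
          simp [pvStepA, hh']
        have hB : pvStepB (out, buf) line = (out, buf ++ [line]) := by
          simp [pvStepB, hh', hb]
        rw [hA, hB]
        refine ih out (buf ++ [line]) ?_ hout
        intro b hbm
        rcases List.mem_append.mp hbm with h1 | h1
        · exact hbuf b h1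
        · simp at h1; rw [h1]; exact hb
      · -- content line: B flushes the buffer
        have hA : pvStepA (out ++ buf) line = out ++ buf ++ [line] := by
          simp [pvStepA, hh']
        have hB : pvStepB (out, buf) line = (out ++ buf ++ [line], []) := by
          simp [pvStepB, hh', hb]
        rw [hA, hB]
        have hlast : ∀ l, (out ++ buf ++ [line]).getLast? = some l →
            PySem.Str.strip l ≠ "" := by
          intro l hl
          simp [List.getLast?_append] at hl
          rw [← hl]; exact hb
        simpa using ih (out ++ buf ++ [line]) [] (by simp) hlast

-- ===== VERDICT (by name: the statement is the Claim_ definition above) =====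
theorem ensure_blank_before_headers_spec : Claim_equal_ensure_blank_before_headers := by
  intro lines _
  unfold Spec_ensure_blank_before_headers ensure_blank_before_headers ensure_blank_before_headers_alt
  simpa using fold_agree lines [] [] (by simp) (by simp)
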